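-- pv_equiv track=rewrite | github.com/bysph/leetcode | find-mid-num.py | findMidNum
-- ===== SOURCE A (Python) =====
-- def findMidNum(nums):
--     maxN = 0
--     stack = []
--     for i in nums:
--         while stack and stack[-1] > i:
--             stack.pop()
--         if i > maxN:
--             stack.append(i)
--             maxN = i
--     return stack
-- ===== SOURCE B (Python) =====
-- def findMidNum(nums):
--     # suffix[k] = min of nums[k:]; None stands for +infinity (past the end).
--     # Built in one backward pass (appended, then reversed into position).
--     suffix = [None]
--     for v in reversed(nums):
--         m = suffix[-1]
--         suffix.append(v if m is None else min(v, m))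
--     suffix.reverse()
--     res = []
--     maxPrev = 0
--     for v, m in zip(nums, suffix[1:]):
--         if v > maxPrev:
--             if m is None or v <= m:
--                 res.append(v)
--             maxPrev = v
--     return res
-- ===== Notes on version B (the rewrite author's own statement) =====
-- stated objective: alternative
-- what changed: Replaces the monotonic stack with push/pop by a precomputed backward suffix-minimum table plus one forward selection pass (append v iff it is a new strict positive prefix max and v <= min of the remaining elements), so nothing is ever retracted.
import Mathlib
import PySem

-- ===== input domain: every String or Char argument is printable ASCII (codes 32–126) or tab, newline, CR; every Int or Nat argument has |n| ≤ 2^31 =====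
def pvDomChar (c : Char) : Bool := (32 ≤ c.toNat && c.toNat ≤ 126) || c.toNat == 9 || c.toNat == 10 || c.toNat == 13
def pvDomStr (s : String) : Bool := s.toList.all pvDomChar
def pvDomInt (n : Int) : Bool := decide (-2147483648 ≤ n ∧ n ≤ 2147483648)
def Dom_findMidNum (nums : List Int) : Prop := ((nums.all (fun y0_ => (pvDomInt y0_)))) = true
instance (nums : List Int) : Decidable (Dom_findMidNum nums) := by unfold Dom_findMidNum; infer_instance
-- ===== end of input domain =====

-- B replaces A's monotonic push/pop stack by a suffix-minimum table plus one forward selection pass (alternative decomposition, same cost).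

-- ===== PORT A =====
-- The Python stack appends/pops at the END; we hold it head-first (head = top) and
-- reverse at the return, so 'pop while top > i' is dropWhile at the head.
def pvFoldA : List Int → Int → List Int → List Int
  | [], _, stack => stack
  | i :: rest, maxN, stack =>
    let stack1 := stack.dropWhile (fun x => decide (x > i))   -- while stack and stack[-1] > i: stack.pop()
    if i > maxN then pvFoldA rest i (i :: stack1)             -- stack.append(i); maxN = i
    else pvFoldA rest maxN stack1

def findMidNum (nums : List Int) : List Int := (pvFoldA nums 0 []).reverse

-- ===== PORT B =====
-- suffix-minimum list of Source B: pvSuffMins l has length l.length+1; entry k = min of l[k:], none = +infinity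
def pvSuffMins : List Int → List (Option Int)
  | [] => [none]
  | v :: t =>
    let s := pvSuffMins t
    (match s.headD none with
     | none => some v
     | some m => some (min v m)) :: s

-- the forward pass of Source B over zip(nums, suffix[1:]) with accumulator maxPrev
def pvBZip : List (Int × Option Int) → Int → List Int
  | [], _ => []
  | (v, m) :: t, maxPrev =>
    if v > maxPrev then
      (if (match m with | none => true | some s => decide (v ≤ s)) then v :: pvBZip t v else pvBZip t v)
    else pvBZip t maxPrev

def findMidNum_alt (nums : List Int) : List Int :=
  let suffix := pvSuffMins nums
  pvBZip (nums.zip suffix.tail) 0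

-- ===== PRECONDITION & SPEC =====
def Spec_findMidNum (nums : List Int) (out : List Int) : Prop := out = findMidNum_alt nums
instance (nums : List Int) (out : List Int) : Decidable (Spec_findMidNum nums out) := by unfold Spec_findMidNum; infer_instance

-- ===== CLAIM (what is proved, stated in full; the proofs are below) =====
def Claim_equal_findMidNum : Prop := ∀ (nums : List Int), Dom_findMidNum nums → Spec_findMidNum nums (findMidNum nums)

-- ===== LEMMAS AND PROOFS =====

-- middle characterisation: keep i iff it is a new strict max (floor 0) and ≤ every later element
def pvSel : List Int → Int → List Int
  | [], _ => []
  | i :: t, m =>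
    if i > m then
      (if t.all (fun j => decide (i ≤ j)) then i :: pvSel t i else pvSel t i)
    else pvSel t m

theorem pvSuffMins_ne_nil (l : List Int) : pvSuffMins l ≠ [] := by
  cases l <;> simp [pvSuffMins]

-- the headD of the suffix-min list decides "v ≤ all of t"
theorem pvSuffMins_headD (t : List Int) (v : Int) :
    (match (pvSuffMins t).headD none with
     | none => true
     | some s => decide (v ≤ s)) = t.all (fun j => decide (v ≤ j)) := by
  induction t generalizing v with
  | nil => simp [pvSuffMins]
  | cons x r ih =>
    have hih := ih v
    simp only [pvSuffMins, List.headD_cons, List.all_cons]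
    cases h : (pvSuffMins r).headD none with
    | none =>
      rw [h] at hih
      simp only at hih
      simp [← hih]
    | some m =>
      rw [h] at hih
      simp only at hih
      rw [← hih]
      by_cases h1 : v ≤ x <;> by_cases h2 : v ≤ m <;>
        simp [h1, h2]

theorem pvBZip_eq_pvSel (t : List Int) (m : Int) :
    pvBZip (t.zip (pvSuffMins t).tail) m = pvSel t m := by
  induction t generalizing m with
  | nil => simp [pvBZip, pvSel]
  | cons v r ih =>
    have htail : (pvSuffMins (v :: r)).tail = pvSuffMins r := by
      simp [pvSuffMins]
    rw [htail]
    obtain ⟨s0, stail, hs⟩ : ∃ a l, pvSuffMins r = a :: l := by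
      cases h : pvSuffMins r with
      | nil => exact absurd h (pvSuffMins_ne_nil r)
      | cons a l => exact ⟨a, l, rfl⟩
    have hhead : (pvSuffMins r).headD none = s0 := by rw [hs]; rfl
    have hcond := pvSuffMins_headD r v
    rw [hhead] at hcond
    have htl : stail = (pvSuffMins r).tail := by rw [hs]; rfl
    rw [hs]
    simp only [List.zip_cons_cons, pvBZip, pvSel, htl]
    rw [hcond]
    by_cases hv : v > m <;> simp [hv, ih]

-- with a strictly decreasing (head-first) stack, the pop-while loop is a filter
theorem dropWhile_gt_eq_filter (st : List Int) (i : Int)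
    (hp : st.Pairwise (· > ·)) :
    st.dropWhile (fun x => decide (x > i)) = st.filter (fun x => decide (x ≤ i)) := by
  induction st with
  | nil => rfl
  | cons x r ih =>
    rcases List.pairwise_cons.mp hp with ⟨hx, hr⟩
    by_cases h : x > i
    · simp [List.dropWhile, List.filter, h, not_le.mpr h, ih hr]
    · rw [not_lt] at h
      have : r.filter (fun y => decide (y ≤ i)) = r := by
        apply List.filter_eq_self.mpr
        intro y hy
        exact decide_eq_true (le_of_lt (lt_of_lt_of_le (hx y hy) h))
      simp [List.dropWhile, List.filter, not_lt.mpr h, h, this]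

-- the main invariant: A's fold = reversed selections ++ the survivors of the incoming stack
theorem pvFoldA_eq (t : List Int) :
    ∀ (m : Int) (st : List Int), 0 ≤ m → st.Pairwise (· > ·) →
      (∀ x ∈ st, x ≤ m) →
      pvFoldA t m st =
        (pvSel t m).reverse ++ st.filter (fun v => t.all (fun j => decide (v ≤ j))) := by
  induction t with
  | nil =>
    intro m st _ _ _
    simp [pvFoldA, pvSel, List.filter_eq_self.mpr]
  | cons i r ih =>
    intro m st hm hp hle
    have hdrop := dropWhile_gt_eq_filter st i hp
    have hsub : (st.filter (fun x => decide (x ≤ i))).Sublist st := List.filter_sublist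
    have hp1 : (st.filter (fun x => decide (x ≤ i))).Pairwise (· > ·) := hp.sublist hsub
    have hmem1 : ∀ x ∈ st.filter (fun x => decide (x ≤ i)), x ∈ st :=
      fun x hx => hsub.subset hx
    -- splitting the conjunction in the survivor filter
    have hfilter : st.filter (fun v => (i :: r).all (fun j => decide (v ≤ j)))
        = (st.filter (fun x => decide (x ≤ i))).filter (fun v => r.all (fun j => decide (v ≤ j))) := by
      rw [List.filter_filter]
      apply List.filter_congr
      intro x _
      simp [List.all_cons, Bool.and_comm]
    by_cases hi : i > m
    · -- i is a new strict max: it is pushed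
      have h0i : (0:Int) ≤ i := le_of_lt (lt_of_le_of_lt hm hi)
      have hlt : ∀ y ∈ st.filter (fun x => decide (x ≤ i)), y < i :=
        fun y hy => lt_of_le_of_lt (hle y (hmem1 y hy)) hi
      have hp2 : (i :: st.filter (fun x => decide (x ≤ i))).Pairwise (· > ·) :=
        List.pairwise_cons.mpr ⟨fun y hy => hlt y hy, hp1⟩
      have hle2 : ∀ x ∈ i :: st.filter (fun x => decide (x ≤ i)), x ≤ i := by
        intro x hx
        rcases List.mem_cons.mp hx with h | h
        · exact le_of_eq h
        · exact le_of_lt (hlt x h)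
      have key := ih i (i :: st.filter (fun x => decide (x ≤ i))) h0i hp2 hle2
      simp only [pvFoldA, hdrop, if_pos hi]
      rw [key, hfilter]
      by_cases hc : r.all (fun j => decide (i ≤ j)) = true
      · simp [pvSel, hi, hc]
      · simp [pvSel, hi, hc]
    · -- i is not a new max: only the pops happen
      have key := ih m (st.filter (fun x => decide (x ≤ i))) hm hp1
        (fun x hx => hle x (hmem1 x hx))
      simp only [pvFoldA, hdrop, if_neg hi]
      rw [key, hfilter]
      simp [pvSel, hi]

theorem findMidNum_eq_sel (nums : List Int) : findMidNum nums = pvSel nums 0 := by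
  have h := pvFoldA_eq nums 0 [] le_rfl (by simp) (by simp)
  simp [findMidNum, h]

theorem findMidNum_alt_eq_sel (nums : List Int) : findMidNum_alt nums = pvSel nums 0 := by
  simp [findMidNum_alt, pvBZip_eq_pvSel]

-- ===== VERDICT (by name: the statement is the Claim_ definition above) =====
theorem findMidNum_spec : Claim_equal_findMidNum := by
  intro nums _
  unfold Spec_findMidNum
  rw [findMidNum_eq_sel, findMidNum_alt_eq_sel]
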